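-- pv_equiv track=rewrite | github.com/raven-dev-ops/ETL-Identity-Data-Ruleset-Engine | src/etl_identity_engine/quality/exceptions.py | _build_completeness_metrics
-- ===== SOURCE A (Python) =====
-- def _build_completeness_metrics(rows: list[dict[str, str]]) -> dict[str, int]:
--     raw_name_present = sum(
--         1
--         for row in rows
--         if any(part.strip() for part in (row.get("first_name", ""), row.get("last_name", "")))
--     )
--     return {
--         "raw_name_present": raw_name_present,
--         "canonical_name_present": sum(1 for row in rows if row.get("canonical_name", "").strip()),
--         "raw_dob_present": sum(1 for row in rows if row.get("dob", "").strip()),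
--         "canonical_dob_present": sum(1 for row in rows if row.get("canonical_dob", "").strip()),
--         "raw_phone_present": sum(1 for row in rows if row.get("phone", "").strip()),
--         "canonical_phone_present": sum(1 for row in rows if row.get("canonical_phone", "").strip()),
--     }
-- ===== SOURCE B (Python) =====
-- def _build_completeness_metrics(rows: list[dict[str, str]]) -> dict[str, int]:
--     rn = cn = rd = cd = rp = cp = 0
--     for row in rows:
--         if any(part.strip() for part in (row.get("first_name", ""), row.get("last_name", ""))):
--             rn += 1
--         if row.get("canonical_name", "").strip():
--             cn += 1
--         if row.get("dob", "").strip():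
--             rd += 1
--         if row.get("canonical_dob", "").strip():
--             cd += 1
--         if row.get("phone", "").strip():
--             rp += 1
--         if row.get("canonical_phone", "").strip():
--             cp += 1
--     return {
--         "raw_name_present": rn,
--         "canonical_name_present": cn,
--         "raw_dob_present": rd,
--         "canonical_dob_present": cd,
--         "raw_phone_present": rp,
--         "canonical_phone_present": cp,
--     }
-- ===== Notes on version B (the rewrite author's own statement) =====
-- stated objective: alternative
-- what changed: Replaces A's six separate generator-expression scans over rows (one per metric) by a single pass that maintains six integer counters and builds the result dict from them at the end.
import Mathlib
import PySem

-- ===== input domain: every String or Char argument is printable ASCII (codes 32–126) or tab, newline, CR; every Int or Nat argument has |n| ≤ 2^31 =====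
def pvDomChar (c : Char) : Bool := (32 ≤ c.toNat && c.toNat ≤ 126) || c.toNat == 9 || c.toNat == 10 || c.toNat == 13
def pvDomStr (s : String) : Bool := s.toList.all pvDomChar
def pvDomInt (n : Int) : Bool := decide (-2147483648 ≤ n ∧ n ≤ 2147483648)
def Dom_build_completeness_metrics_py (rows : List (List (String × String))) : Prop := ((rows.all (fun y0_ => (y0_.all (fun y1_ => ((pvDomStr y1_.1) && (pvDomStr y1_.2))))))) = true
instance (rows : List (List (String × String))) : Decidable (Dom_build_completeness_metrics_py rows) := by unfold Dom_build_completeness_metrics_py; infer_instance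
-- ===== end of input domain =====

-- B replaces A's six separate scans over rows by one fused pass with six counters (alternative decomposition, same cost).

-- shared helpers: row.get(k, "") and the truthiness test "row.get(k, '').strip()"
def pvRowGet (row : List (String × String)) (k : String) : String :=
  (PySem.Dict.mk row).getD k ""

def pvPresent (row : List (String × String)) (k : String) : Bool :=
  !(PySem.Str.strip (pvRowGet row k) == "")

def pvNamePresent (row : List (String × String)) : Bool :=
  pvPresent row "first_name" || pvPresent row "last_name"

-- ===== PORT A =====
-- six independent sum(1 for row in rows if …) scans, each a foldl over rows
def build_completeness_metrics_py (rows : List (List (String × String))) : List (String × Int) :=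
  let raw_name_present :=
    rows.foldl (fun acc row => if pvNamePresent row then acc + 1 else acc) (0 : Int)
  [("raw_name_present", raw_name_present),
   ("canonical_name_present",
     rows.foldl (fun acc row => if pvPresent row "canonical_name" then acc + 1 else acc) (0 : Int)),
   ("raw_dob_present",
     rows.foldl (fun acc row => if pvPresent row "dob" then acc + 1 else acc) (0 : Int)),
   ("canonical_dob_present",
     rows.foldl (fun acc row => if pvPresent row "canonical_dob" then acc + 1 else acc) (0 : Int)),
   ("raw_phone_present",
     rows.foldl (fun acc row => if pvPresent row "phone" then acc + 1 else acc) (0 : Int)),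
   ("canonical_phone_present",
     rows.foldl (fun acc row => if pvPresent row "canonical_phone" then acc + 1 else acc) (0 : Int))]

-- ===== PORT B =====
-- one pass: a 6-tuple of counters updated per row
def pvStep (acc : Int × Int × Int × Int × Int × Int) (row : List (String × String)) :
    Int × Int × Int × Int × Int × Int :=
  let (rn, cn, rd, cd, rp, cp) := acc
  ((if pvNamePresent row then rn + 1 else rn),
   (if pvPresent row "canonical_name" then cn + 1 else cn),
   (if pvPresent row "dob" then rd + 1 else rd),
   (if pvPresent row "canonical_dob" then cd + 1 else cd),
   (if pvPresent row "phone" then rp + 1 else rp),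
   (if pvPresent row "canonical_phone" then cp + 1 else cp))

def build_completeness_metrics_py_alt (rows : List (List (String × String))) : List (String × Int) :=
  let (rn, cn, rd, cd, rp, cp) := rows.foldl pvStep (0, 0, 0, 0, 0, 0)
  [("raw_name_present", rn),
   ("canonical_name_present", cn),
   ("raw_dob_present", rd),
   ("canonical_dob_present", cd),
   ("raw_phone_present", rp),
   ("canonical_phone_present", cp)]

-- ===== PRECONDITION & SPEC =====
def Spec_build_completeness_metrics_py (rows : List (List (String × String))) (out : List (String × Int)) : Prop := out = build_completeness_metrics_py_alt rows
instance (rows : List (List (String × String))) (out : List (String × Int)) : Decidable (Spec_build_completeness_metrics_py rows out) := by unfold Spec_build_completeness_metrics_py; infer_instance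

-- ===== CLAIM (what is proved, stated in full; the proofs are below) =====
def Claim_equal_build_completeness_metrics_py : Prop := ∀ (rows : List (List (String × String))), Dom_build_completeness_metrics_py rows → Spec_build_completeness_metrics_py rows (build_completeness_metrics_py rows)

-- ===== LEMMAS AND PROOFS =====
-- one fused pass equals the six independent passes, for arbitrary start counters
theorem pvStep_foldl (rows : List (List (String × String)))
    (rn cn rd cd rp cp : Int) :
    rows.foldl pvStep (rn, cn, rd, cd, rp, cp) =
      (rows.foldl (fun acc row => if pvNamePresent row then acc + 1 else acc) rn,
       rows.foldl (fun acc row => if pvPresent row "canonical_name" then acc + 1 else acc) cn,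
       rows.foldl (fun acc row => if pvPresent row "dob" then acc + 1 else acc) rd,
       rows.foldl (fun acc row => if pvPresent row "canonical_dob" then acc + 1 else acc) cd,
       rows.foldl (fun acc row => if pvPresent row "phone" then acc + 1 else acc) rp,
       rows.foldl (fun acc row => if pvPresent row "canonical_phone" then acc + 1 else acc) cp) := by
  induction rows generalizing rn cn rd cd rp cp with
  | nil => rfl
  | cons r rs ih => simp only [List.foldl_cons, pvStep, ih]

-- ===== VERDICT (by name: the statement is the Claim_ definition above) =====
theorem build_completeness_metrics_py_spec : Claim_equal_build_completeness_metrics_py := by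
  intro rows _
  unfold Spec_build_completeness_metrics_py build_completeness_metrics_py build_completeness_metrics_py_alt
  rw [pvStep_foldl]
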